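-- pv_equiv track=rewrite | github.com/addtheletters/HS-AI | home/perms.py | swapPerms
-- ===== SOURCE A (Python) =====
-- def swapPerms(word):
--     # generates permutations for word in swap order
--     # meaning only adjacent swaps allowed
--     # ABC, BAC, BCA, CBA, CAB, ACB
--     if len(word) < 2: return [word]
--     aPerms = []
--     aSubPerms = swapPerms(word[1:])
--     walkingLetter = word[0]
--     walkFromLeft = True
--     for perm in aSubPerms:
--         if walkFromLeft:
--             for i in range(len(word)):
--                 newWord = perm[:i] + walkingLetter + perm[i:]
--                 aPerms.append(newWord)
--             walkFromLeft = False
--         else: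
--             for i in range(len(word)):
--                 dex = len(word) - i - 1
--                 newWord = perm[:dex] + walkingLetter + perm[dex:]
--                 aPerms.append(newWord)
--             walkFromLeft = True
--     return aPerms
-- ===== SOURCE B (Python) =====
-- def swapPerms(word):
--     # iterative successive-insertion (bottom-up), parity of the perm's index
--     # decides the insertion direction instead of a mutable toggle
--     if len(word) < 2:
--         return [word]
--     result = [word[-1]]
--     for k in range(len(word) - 2, -1, -1):
--         letter = word[k]
--         new = []
--         for j, perm in enumerate(result):
--             positions = range(len(perm) + 1)
--             if j % 2:
--                 positions = reversed(positions)
--             for i in positions: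
--                 new.append(perm[:i] + letter + perm[i:])
--         result = new
--     return result
-- ===== Notes on version B (the rewrite author's own statement) =====
-- stated objective: alternative
-- what changed: Replaced A's top-down recursion (insert word[0] into the recursively computed permutations of word[1:], with a mutable direction toggle) by an iterative bottom-up fold: start from the last letter and successively insert each earlier letter at every position of every accumulated permutation, the insertion direction decided by the parity of the permutation's index instead of a toggle.
import Mathlib
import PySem

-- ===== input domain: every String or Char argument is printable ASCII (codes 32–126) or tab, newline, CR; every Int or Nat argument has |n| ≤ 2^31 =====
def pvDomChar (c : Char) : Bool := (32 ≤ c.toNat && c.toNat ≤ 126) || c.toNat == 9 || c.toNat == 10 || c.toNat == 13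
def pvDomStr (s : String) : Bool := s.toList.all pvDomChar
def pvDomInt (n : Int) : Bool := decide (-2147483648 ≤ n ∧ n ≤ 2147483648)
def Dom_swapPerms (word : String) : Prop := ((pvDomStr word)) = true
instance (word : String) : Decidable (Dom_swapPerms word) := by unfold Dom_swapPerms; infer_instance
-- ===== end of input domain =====

-- B replaces A's top-down recursion with an iterative bottom-up successive-insertion fold,
-- using the parity of each permutation's index instead of a mutable direction toggle (objective: alternative).

-- perm[:i] + letter + perm[i:] — exact for 0 ≤ i (Python slices clamp like take/drop)
def pvIns (c : Char) (p : List Char) (i : Nat) : List Char := p.take i ++ c :: p.drop i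

-- ===== PORT A =====
-- recursion of A carried out on the char list of the word
def swapPermsGo : List Char → List (List Char)
  | [] => [[]]
  | [c] => [[c]]
  | c :: c2 :: rest =>
      let subs := swapPermsGo (c2 :: rest)
      let n := (c :: c2 :: rest).length
      (subs.foldl (fun (st : List (List Char) × Bool) perm =>
        if st.2 then
          (st.1 ++ (List.range n).map (fun i => pvIns c perm i), false)
        else
          (st.1 ++ (List.range n).map (fun i => pvIns c perm (n - i - 1)), true))
        ([], true)).1

def swapPerms (word : String) : List String :=
  if word.toList.length < 2 then [word]
  else (swapPermsGo word.toList).map String.mk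

-- ===== PORT B =====
-- one insertion pass for the letter c over the accumulated permutations
def swapPermsAltStep (c : Char) (acc : List (List Char)) : List (List Char) :=
  (PySem.List.enumerate acc).flatMap (fun jp =>
    if jp.1 % 2 ≠ 0 then
      (List.range (jp.2.length + 1)).reverse.map (fun i => pvIns c jp.2 i)
    else
      (List.range (jp.2.length + 1)).map (fun i => pvIns c jp.2 i))

def swapPerms_alt (word : String) : List String :=
  let cs := word.toList
  if cs.length < 2 then [word]
  else ((cs.dropLast.foldr swapPermsAltStep [[cs.getLastD ' ']]).map String.mk)

-- ===== PRECONDITION & SPEC =====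
def Spec_swapPerms (word : String) (out : List String) : Prop := out = swapPerms_alt word
instance (word : String) (out : List String) : Decidable (Spec_swapPerms word out) := by unfold Spec_swapPerms; infer_instance

-- ===== CLAIM (what is proved, stated in full; the proofs are below) =====
def Claim_equal_swapPerms : Prop := ∀ (word : String), Dom_swapPerms word → Spec_swapPerms word (swapPerms word)

-- ===== LEMMAS AND PROOFS =====

-- proof-only: the toggle-directed insertion pass, written structurally
def toggleList (c : Char) (n : Nat) : List (List Char) → Bool → List (List Char)
  | [], _ => []
  | p :: L, b =>
      (if b then (List.range n).map (fun i => pvIns c p i)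
       else (List.range n).map (fun i => pvIns c p (n - i - 1))) ++ toggleList c n L (!b)

theorem pvIns_length (c : Char) (p : List Char) (i : Nat) (h : i ≤ p.length) :
    (pvIns c p i).length = p.length + 1 := by
  simp only [pvIns, List.length_append, List.length_take, List.length_cons, List.length_drop]
  omega

theorem foldl_toggle (c : Char) (n : Nat) :
    ∀ (L : List (List Char)) (acc : List (List Char)) (b : Bool),
      (L.foldl (fun (st : List (List Char) × Bool) perm =>
        if st.2 then
          (st.1 ++ (List.range n).map (fun i => pvIns c perm i), false)
        else
          (st.1 ++ (List.range n).map (fun i => pvIns c perm (n - i - 1)), true))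
        (acc, b)).1 = acc ++ toggleList c n L b := by
  intro L
  induction L with
  | nil => intro acc b; simp [toggleList]
  | cons p L ih =>
      intro acc b
      cases b
      · rw [List.foldl_cons]
        simp only [Bool.false_eq_true, if_false, toggleList]
        rw [ih]
        simp [List.append_assoc]
      · rw [List.foldl_cons]
        simp only [if_true, toggleList]
        rw [ih]
        simp [List.append_assoc]

theorem mem_toggleList_length (c : Char) (n : Nat) :
    ∀ (L : List (List Char)) (b : Bool), (∀ p ∈ L, p.length + 1 = n) →
      ∀ q ∈ toggleList c n L b, q.length = n := by
  intro L
  induction L with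
  | nil => intro b _ q hq; simp [toggleList] at hq
  | cons p L ih =>
      intro b hlen q hq
      have hp : p.length + 1 = n := hlen p (by simp)
      simp only [toggleList, List.mem_append] at hq
      rcases hq with hq | hq
      · split at hq <;>
        · simp only [List.mem_map, List.mem_range] at hq
          obtain ⟨i, hi, rfl⟩ := hq
          rw [pvIns_length] <;> omega
      · exact ih (!b) (fun r hr => hlen r (by simp [hr])) q hq

theorem swapPermsGo_length : ∀ (w : List Char), ∀ p ∈ swapPermsGo w, p.length = w.length := by
  intro w
  induction w with
  | nil => intro p hp; rw [swapPermsGo] at hp; simp at hp; simp [hp]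
  | cons c rest ih =>
      cases rest with
      | nil => intro p hp; rw [swapPermsGo] at hp; simp at hp; simp [hp]
      | cons c2 rest' =>
          intro p hp
          rw [swapPermsGo] at hp
          rw [foldl_toggle] at hp
          simp only [List.nil_append] at hp
          have := mem_toggleList_length c ((c :: c2 :: rest').length) (swapPermsGo (c2 :: rest')) true
            (fun q hq => by rw [ih q hq]; simp) p hp
          simpa using this

theorem range_reverse_map {α : Type} (g : Nat → α) :
    ∀ n : Nat, (List.range n).reverse.map g = (List.range n).map (fun i => g (n - i - 1)) := by
  intro n
  apply List.ext_getElem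
  · simp
  · intro k h1 h2
    simp only [List.getElem_map, List.getElem_reverse, List.length_range, List.getElem_range]
    congr 1
    omega

theorem enumerate_flatMap_toggle (c : Char) (n : Nat) :
    ∀ (L : List (List Char)) (s : Int), 0 ≤ s → (∀ p ∈ L, p.length + 1 = n) →
      ((PySem.List.enumerate L s).flatMap (fun jp =>
        if jp.1 % 2 ≠ 0 then
          (List.range (jp.2.length + 1)).reverse.map (fun i => pvIns c jp.2 i)
        else
          (List.range (jp.2.length + 1)).map (fun i => pvIns c jp.2 i)))
      = toggleList c n L (decide (s % 2 = 0)) := by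
  intro L
  induction L with
  | nil => intro s _ _; simp [PySem.List.enumerate_nil, toggleList]
  | cons p L ih =>
      intro s hs hlen
      have hp : p.length + 1 = n := hlen p (by simp)
      rw [PySem.List.enumerate_cons, List.flatMap_cons,
        ih (s + 1) (by omega) (fun r hr => hlen r (by simp [hr]))]
      have hflip : (decide ((s + 1) % 2 = 0)) = !(decide (s % 2 = 0)) := by
        by_cases h0 : s % 2 = 0 <;> simp [h0] <;> omega
      rw [hflip]
      by_cases h0 : s % 2 = 0
      · simp only [h0, decide_true, toggleList]
        rw [hp]
        simp
      · simp only [h0, decide_false, toggleList]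
        rw [hp, range_reverse_map, if_pos h0]
        simp only [Bool.false_eq_true, if_false]
  
theorem go_eq_foldr : ∀ (w : List Char), w ≠ [] →
    swapPermsGo w = w.dropLast.foldr swapPermsAltStep [[w.getLastD ' ']] := by
  intro w
  induction w with
  | nil => intro h; exact absurd rfl h
  | cons c rest ih =>
      intro _
      cases rest with
      | nil => rw [swapPermsGo]; rfl
      | cons c2 rest' =>
          have hrest : (c2 :: rest') ≠ [] := by simp
          rw [swapPermsGo]
          rw [foldl_toggle, List.nil_append]
          have hdl : (c :: c2 :: rest').dropLast = c :: (c2 :: rest').dropLast := by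
            simp [List.dropLast]
          have hgl : (c :: c2 :: rest').getLastD ' ' = (c2 :: rest').getLastD ' ' := by
            simp [List.getLastD]
          rw [hdl, hgl, List.foldr_cons, ← ih hrest]
          rw [swapPermsAltStep]
          rw [enumerate_flatMap_toggle c ((c :: c2 :: rest').length) (swapPermsGo (c2 :: rest')) 0
            (by omega) (fun q hq => by rw [swapPermsGo_length _ q hq]; simp)]
          norm_num

-- ===== VERDICT (by name: the statement is the Claim_ definition above) =====
theorem swapPerms_spec : Claim_equal_swapPerms := by
  intro word _
  show swapPerms word = swapPerms_alt word
  simp only [swapPerms, swapPerms_alt]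
  by_cases h : word.toList.length < 2
  · rw [if_pos h, if_pos h]
  · have hne : word.toList ≠ [] := by
      intro hnil; rw [hnil] at h; simp at h
    rw [if_neg h, if_neg h, go_eq_foldr _ hne]
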